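-- pv_equiv track=rewrite | github.com/jesselooney/pysat | examples/cuscus.py | bitstr_from_model
-- ===== SOURCE A (Python) =====
-- def bitstr_from_model(model: list[int]) -> str:
--     # TODO: Document.
--     if not model:
--         return ""
--
--     var_count = max(abs(lit) for lit in model)
--     bitstr = ["0"] * var_count
--     for literal in model:
--         if literal > 0:
--             index = abs(literal) - 1
--             bitstr[index] = "1"
--
--     return "".join(bitstr)
-- ===== SOURCE B (Python) =====
-- def bitstr_from_model(model: list[int]) -> str:
--     if not model:
--         return ""
--
--     pos = {lit for lit in model if lit > 0}
--     var_count = max(abs(lit) for lit in model)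
--     return "".join("1" if i in pos else "0" for i in range(1, var_count + 1))
-- ===== Notes on version B (the rewrite author's own statement) =====
-- stated objective: idiomatic
-- what changed: Instead of preallocating a mutable list and scatter-writing '1' at index |lit|-1 for each positive literal, B builds a set of positive literals once and generates the bitstring by iterating over the variable positions 1..var_count with a membership test.
import Mathlib
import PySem

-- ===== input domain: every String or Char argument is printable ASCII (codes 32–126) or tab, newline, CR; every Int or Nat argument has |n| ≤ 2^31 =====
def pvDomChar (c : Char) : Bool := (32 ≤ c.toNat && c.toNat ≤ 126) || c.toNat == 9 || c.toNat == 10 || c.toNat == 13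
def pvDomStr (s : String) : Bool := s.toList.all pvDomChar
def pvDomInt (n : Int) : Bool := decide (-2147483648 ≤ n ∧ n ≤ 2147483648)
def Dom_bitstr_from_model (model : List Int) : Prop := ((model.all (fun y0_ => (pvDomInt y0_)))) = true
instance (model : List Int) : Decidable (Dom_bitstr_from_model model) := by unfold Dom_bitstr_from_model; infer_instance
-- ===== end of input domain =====

-- B builds a set of positive literals and iterates over positions 1..var_count with a
-- membership test, instead of A's preallocated list with scatter-writes (objective: idiomatic).

-- ===== PORT A =====
-- 'bitstr[index] = "1"': index = |literal| - 1 ≥ 0 (literal > 0) and |literal| ≤ var_count, so the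
-- assignment is always in range; PySem.List.pySetD is exact there (Python never raises on these inputs).
def bitstr_from_model (model : List Int) : String :=
  if model = [] then ""
  else
    let var_count : Int := (PySem.List.max? (model.map (fun lit => |lit|)) (fun x => x)).getD 0
    let bitstr : List String := PySem.List.pyRepeat ["0"] var_count
    let bitstr : List String := model.foldl
      (fun bs literal =>
        if literal > 0 then PySem.List.pySetD bs (|literal| - 1) "1" else bs) bitstr
    PySem.Str.join "" bitstr

-- ===== PORT B =====
def bitstr_from_model_alt (model : List Int) : String :=
  if model = [] then ""
  else
    let pos : PySem.Set Int := PySem.Set.ofList (model.filter (fun lit => lit > 0))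
    let var_count : Int := (PySem.List.max? (model.map (fun lit => |lit|)) (fun x => x)).getD 0
    PySem.Str.join ""
      ((PySem.List.pyRange 1 (var_count + 1) 1).map
        (fun i => if PySem.Set.contains pos i then "1" else "0"))

-- ===== PRECONDITION & SPEC =====
def Spec_bitstr_from_model (model : List Int) (out : String) : Prop := out = bitstr_from_model_alt model
instance (model : List Int) (out : String) : Decidable (Spec_bitstr_from_model model out) := by unfold Spec_bitstr_from_model; infer_instance

-- ===== CLAIM (what is proved, stated in full; the proofs are below) =====
def Claim_equal_bitstr_from_model : Prop := ∀ (model : List Int), Dom_bitstr_from_model model → Spec_bitstr_from_model model (bitstr_from_model model)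

-- ===== LEMMAS AND PROOFS =====

-- A's scatter-write loop, characterised pointwise: position j holds "1" exactly when the literal
-- j+1 occurs in the processed literals (every write stores "1" at index literal - 1).
theorem pv_fold_getElem (ms : List Int) (bs : List String) (j : Nat) :
    (ms.foldl (fun bs literal =>
        if literal > 0 then PySem.List.pySetD bs (|literal| - 1) "1" else bs) bs)[j]? =
      if ((j : Int) + 1) ∈ ms ∧ j < bs.length then some "1" else bs[j]? := by
  induction ms generalizing bs with
  | nil => simp
  | cons l t ih =>
    simp only [List.foldl_cons]
    by_cases hl : l > 0
    · rw [if_pos hl, ih]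
      have habs : |l| = l := abs_of_pos hl
      rw [habs, PySem.List.pySetD_of_nonneg (h := by omega)]
      have hlen : (bs.set (l - 1).toNat "1").length = bs.length := by simp
      rw [hlen, List.getElem?_set]
      by_cases heq : (j : Int) + 1 = l
      · have hidx : (l - 1).toNat = j := by omega
        rw [if_pos hidx]
        simp only [List.mem_cons]
        rw [hidx]
        by_cases hj : j < bs.length <;> simp [hj, heq]
      · have hidx : (l - 1).toNat ≠ j := by omega
        rw [if_neg hidx]
        simp only [List.mem_cons]
        by_cases hmem : ((j : Int) + 1) ∈ t <;> simp [hmem, heq]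
    · rw [if_neg hl, ih]
      have heq : (j : Int) + 1 ≠ l := by omega
      simp only [List.mem_cons]
      simp [heq]

-- The two character lists coincide position by position.
theorem pv_lists_eq (model : List Int) :
    (model.foldl (fun bs literal =>
        if literal > 0 then PySem.List.pySetD bs (|literal| - 1) "1" else bs)
      (PySem.List.pyRepeat ["0"] ((PySem.List.max? (model.map fun lit => |lit|) fun x => x).getD 0))) =
    ((PySem.List.pyRange 1 (((PySem.List.max? (model.map fun lit => |lit|) fun x => x).getD 0) + 1) 1).map
      (fun i => if PySem.Set.contains (PySem.Set.ofList (model.filter (fun lit => lit > 0))) i then "1" else "0")) := by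
  set vc : Int := (PySem.List.max? (model.map fun lit => |lit|) fun x => x).getD 0 with hvc
  apply List.ext_getElem?
  intro j
  rw [PySem.List.pyRepeat_singleton, pv_fold_getElem, PySem.List.pyRange_one]
  have hr : (vc + 1 - 1).toNat = vc.toNat := by norm_num
  rw [hr]
  simp only [List.getElem?_map, List.length_replicate]
  by_cases hj : j < vc.toNat
  · have hcon : PySem.Set.contains (PySem.Set.ofList (model.filter (fun lit => lit > 0))) (1 + (j:Int)) = true ↔ ((j:Int) + 1) ∈ model := by
      rw [PySem.Set.contains_iff, PySem.Set.mem_ofList, List.mem_filter]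
      constructor
      · rintro ⟨h1, _⟩; rwa [add_comm] at h1
      · intro h1; exact ⟨by rwa [add_comm], by simp; omega⟩
    rw [List.getElem?_range hj, List.getElem?_replicate]
    by_cases hmem : ((j:Int) + 1) ∈ model
    · simp [hmem, hj]
      exact ⟨by rwa [add_comm], by omega⟩
    · have : PySem.Set.contains (PySem.Set.ofList (model.filter (fun lit => lit > 0))) (1 + (j:Int)) = false := by
        rw [Bool.eq_false_iff]; intro hc; exact hmem (hcon.mp hc)
      simp [hmem, hj]
      intro h
      exact ((hmem (by rwa [add_comm] at h)).elim)
  · rw [List.getElem?_eq_none (by simpa using hj), List.getElem?_eq_none (by simpa using hj)]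
    simp [hj]

-- ===== VERDICT (by name: the statement is the Claim_ definition above) =====
theorem bitstr_from_model_spec : Claim_equal_bitstr_from_model := by
  intro model _
  unfold Spec_bitstr_from_model bitstr_from_model bitstr_from_model_alt
  by_cases hm : model = []
  · simp [hm]
  · simp only [if_neg hm]
    exact congrArg (PySem.Str.join "") (pv_lists_eq model)
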